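-- pv_equiv track=rewrite | github.com/fcUalberta/grid_fault_detection | helper/common.py | create_feature_tier_mapping
-- ===== SOURCE A (Python) =====
-- def create_feature_tier_mapping(feature_names):
--     """
--     Create mapping of features to their computational tiers
--
--     Args:
--         feature_names: List of feature names
--
--     Returns:
--         dict: Feature name to tier mapping
--     """
--     tier_mapping = {}
--
--     # Tier 1: Ultra-fast statistical features (<1ms)
--     tier1_features = [
--         'std', 'rms', 'mean_abs', 'min_val', 'max_val', 'peak_to_peak',
--         'crest_factor', 'form_factor', 'mean_abs_deviation', 'variance'
--     ]
--
--     # Tier 2: Fast signal quality features (1-5ms)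
--     tier2_features = [
--         'zero_crossing_rate', 'peak_count', 'peak_density', 'envelope_mean',
--         'envelope_std', 'envelope_variation', 'high_freq_ratio'
--     ]
--
--     # Tier 3: Advanced features (5-20ms)
--     tier3_features = [
--         'spectral_centroid', 'dominant_frequency', 'dominant_magnitude',
--         'dominant_power_ratio', 'autocorr_first_min'
--     ]
--
--     # Power system specific features
--     power_system_features = [
--         'thd_estimate', 'fundamental_frequency', 'transient_index',
--         'max_gradient', 'amplitude_variation'
--     ]
--
--     # Wavelet features (Tier 3)
--     wavelet_features = [f for f in feature_names if 'wavelet' in f]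
--
--     # Create mapping
--     for feature in feature_names:
--         # if any(s in feature for s in tier1_features):
--         #     tier_mapping[feature] = 'Tier 1: Ultra-fast (<1ms)'
--         if any(s in feature for s in tier2_features):
--             tier_mapping[feature] = 'Tier 2: Fast'
--         elif any(s in feature for s in tier3_features):
--         # or any(feature in s for s in wavelet_features):
--             tier_mapping[feature] = 'Tier 3: Advanced'
--         elif any(s in feature for s in power_system_features) :
--             tier_mapping[feature] = 'Power System Specific'
--         else:
--             tier_mapping[feature] = 'Tier 1: Ultra-fast'
--
--     return tier_mapping
-- ===== SOURCE B (Python) =====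
-- def create_feature_tier_mapping(feature_names):
--     """
--     Create mapping of features to their computational tiers
--     (default-then-override formulation: every feature starts at Tier 1,
--     then keyword categories overwrite in ascending precedence so that
--     Tier 2 wins over Tier 3 wins over Power System, as in the original
--     if/elif chain).
--     """
--     tier_mapping = {f: 'Tier 1: Ultra-fast' for f in feature_names}
--
--     overrides = [
--         (['thd_estimate', 'fundamental_frequency', 'transient_index',
--           'max_gradient', 'amplitude_variation'], 'Power System Specific'),
--         (['spectral_centroid', 'dominant_frequency', 'dominant_magnitude',
--           'dominant_power_ratio', 'autocorr_first_min'], 'Tier 3: Advanced'),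
--         (['zero_crossing_rate', 'peak_count', 'peak_density', 'envelope_mean',
--           'envelope_std', 'envelope_variation', 'high_freq_ratio'], 'Tier 2: Fast'),
--     ]
--     for keywords, label in overrides:
--         for feature in feature_names:
--             if any(kw in feature for kw in keywords):
--                 tier_mapping[feature] = label
--
--     return tier_mapping
-- ===== Notes on version B (the rewrite author's own statement) =====
-- stated objective: alternative
-- what changed: Replaces the per-feature if/elif classification with a default-then-override sweep: the dict is initialized with every feature at 'Tier 1: Ultra-fast' and then each keyword category (power system, tier 3, tier 2, in ascending precedence) overwrites matching features, so the last pass reproduces the elif precedence; the dead tier1/wavelet lists are dropped.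
import Mathlib
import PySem

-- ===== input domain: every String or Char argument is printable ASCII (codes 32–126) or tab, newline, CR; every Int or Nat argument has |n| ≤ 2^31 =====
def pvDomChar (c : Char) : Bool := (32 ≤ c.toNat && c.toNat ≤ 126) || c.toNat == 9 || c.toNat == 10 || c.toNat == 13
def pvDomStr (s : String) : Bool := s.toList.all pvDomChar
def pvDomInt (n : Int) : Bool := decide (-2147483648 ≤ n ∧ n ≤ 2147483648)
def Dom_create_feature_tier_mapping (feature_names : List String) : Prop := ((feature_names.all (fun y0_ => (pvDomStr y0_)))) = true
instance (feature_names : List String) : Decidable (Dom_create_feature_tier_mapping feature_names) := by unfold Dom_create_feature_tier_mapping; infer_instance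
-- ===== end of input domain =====

-- B replaces the per-feature if/elif chain by a default dict plus three keyword override sweeps
-- in ascending precedence (alternative decomposition, same asymptotic cost).

-- ===== PORT A =====
-- A's tier1_features list is dead code (its branch is commented out) and is omitted
def tier2_features : List String :=
  ["zero_crossing_rate", "peak_count", "peak_density", "envelope_mean",
   "envelope_std", "envelope_variation", "high_freq_ratio"]

def tier3_features : List String :=
  ["spectral_centroid", "dominant_frequency", "dominant_magnitude",
   "dominant_power_ratio", "autocorr_first_min"]

def power_system_features : List String :=
  ["thd_estimate", "fundamental_frequency", "transient_index",
   "max_gradient", "amplitude_variation"]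

def create_feature_tier_mapping (feature_names : List String) : List (String × String) :=
  -- wavelet_features is computed by A but never used afterwards
  let _wavelet_features := feature_names.filter (fun f => PySem.Str.isIn "wavelet" f)
  (feature_names.foldl
    (fun (tier_mapping : PySem.Dict String String) feature =>
      if tier2_features.any (fun s => PySem.Str.isIn s feature) then
        tier_mapping.insert feature "Tier 2: Fast"
      else if tier3_features.any (fun s => PySem.Str.isIn s feature) then
        tier_mapping.insert feature "Tier 3: Advanced"
      else if power_system_features.any (fun s => PySem.Str.isIn s feature) then
        tier_mapping.insert feature "Power System Specific"
      else
        tier_mapping.insert feature "Tier 1: Ultra-fast")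
    PySem.Dict.empty).items

-- ===== PORT B =====
def pvKwP : List String :=
  ["thd_estimate", "fundamental_frequency", "transient_index",
   "max_gradient", "amplitude_variation"]
def pvKw3 : List String :=
  ["spectral_centroid", "dominant_frequency", "dominant_magnitude",
   "dominant_power_ratio", "autocorr_first_min"]
def pvKw2 : List String :=
  ["zero_crossing_rate", "peak_count", "peak_density", "envelope_mean",
   "envelope_std", "envelope_variation", "high_freq_ratio"]

def pvOverrides : List (List String × String) :=
  [(pvKwP, "Power System Specific"),
   (pvKw3, "Tier 3: Advanced"),
   (pvKw2, "Tier 2: Fast")]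

-- the inner 'for feature in feature_names' loop of one override sweep
def pvPass (kws : List String) (label : String) (feature_names : List String)
    (m : PySem.Dict String String) : PySem.Dict String String :=
  feature_names.foldl
    (fun m feature =>
      if kws.any (fun kw => PySem.Str.isIn kw feature) then m.insert feature label
      else m)
    m

def create_feature_tier_mapping_alt (feature_names : List String) : List (String × String) :=
  let m0 : PySem.Dict String String :=
    feature_names.foldl (fun m f => m.insert f "Tier 1: Ultra-fast") PySem.Dict.empty
  (pvOverrides.foldl (fun m ov => pvPass ov.1 ov.2 feature_names m) m0).items

-- ===== PRECONDITION & SPEC =====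
def Spec_create_feature_tier_mapping (feature_names : List String) (out : List (String × String)) : Prop := out = create_feature_tier_mapping_alt feature_names
instance (feature_names : List String) (out : List (String × String)) : Decidable (Spec_create_feature_tier_mapping feature_names out) := by unfold Spec_create_feature_tier_mapping; infer_instance

-- ===== CLAIM (what is proved, stated in full; the proofs are below) =====
def Claim_equal_create_feature_tier_mapping : Prop := ∀ (feature_names : List String), Dom_create_feature_tier_mapping feature_names → Spec_create_feature_tier_mapping feature_names (create_feature_tier_mapping feature_names)

-- ===== LEMMAS AND PROOFS =====

-- A's per-feature label, named for the proofs
def pvClassify (f : String) : String :=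
  if tier2_features.any (fun s => PySem.Str.isIn s f) then "Tier 2: Fast"
  else if tier3_features.any (fun s => PySem.Str.isIn s f) then "Tier 3: Advanced"
  else if power_system_features.any (fun s => PySem.Str.isIn s f) then "Power System Specific"
  else "Tier 1: Ultra-fast"

theorem stepA_eq :
    (fun (tier_mapping : PySem.Dict String String) feature =>
      if tier2_features.any (fun s => PySem.Str.isIn s feature) then
        tier_mapping.insert feature "Tier 2: Fast"
      else if tier3_features.any (fun s => PySem.Str.isIn s feature) then
        tier_mapping.insert feature "Tier 3: Advanced"
      else if power_system_features.any (fun s => PySem.Str.isIn s feature) then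
        tier_mapping.insert feature "Power System Specific"
      else
        tier_mapping.insert feature "Tier 1: Ultra-fast")
    = fun (d : PySem.Dict String String) f => d.insert f (pvClassify f) := by
  funext d f
  unfold pvClassify
  split_ifs <;> rfl

theorem gfold_get? (g : String → String) (xs : List String)
    (d : PySem.Dict String String) (k : String) :
    (xs.foldl (fun d f => d.insert f (g f)) d).get? k
      = if k ∈ xs then some (g k) else d.get? k := by
  induction xs generalizing d with
  | nil => simp
  | cons x xs ih =>
    simp only [List.foldl_cons, ih, PySem.Dict.get?_insert, List.mem_cons]
    by_cases hx : k ∈ xs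
    · simp [hx]
    · by_cases he : k = x <;> simp [hx, he]

theorem pass_get? (p : String → Bool) (v : String) (xs : List String)
    (m : PySem.Dict String String) (k : String) :
    (xs.foldl (fun m f => if p f then m.insert f v else m) m).get? k
      = if k ∈ xs ∧ p k = true then some v else m.get? k := by
  induction xs generalizing m with
  | nil => simp
  | cons x xs ih =>
    simp only [List.foldl_cons, ih, List.mem_cons]
    by_cases hx : k ∈ xs ∧ p k = true
    · simp [hx]
    · by_cases he : k = x
      · subst he
        by_cases hp : p k = true
        · simp [hp]
        · simp [hp]
      · by_cases hp : p x = true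
        · simp only [hp, if_true, PySem.Dict.get?_insert, if_neg he]
          simp [hx, he]
        · simp only [hp]
          simp [hx, he]

theorem pvPass_get? (kws : List String) (v : String) (xs : List String)
    (m : PySem.Dict String String) (k : String) :
    (pvPass kws v xs m).get? k
      = if k ∈ xs ∧ (kws.any (fun kw => PySem.Str.isIn kw k)) = true then some v
        else m.get? k := by
  exact pass_get? (fun f => kws.any (fun kw => PySem.Str.isIn kw f)) v xs m k

theorem pvPass_keys (kws : List String) (v : String) (xs : List String)
    (m : PySem.Dict String String) (h : ∀ f ∈ xs, f ∈ m.keys) :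
    (pvPass kws v xs m).keys = m.keys := by
  unfold pvPass
  induction xs generalizing m with
  | nil => rfl
  | cons x xs ih =>
    simp only [List.foldl_cons]
    by_cases hp : (kws.any (fun kw => PySem.Str.isIn kw x)) = true
    · have hc : m.contains x = true :=
        (PySem.Dict.contains_iff_mem_keys m x).mpr (h x (by simp))
      have hk : (m.insert x v).keys = m.keys :=
        PySem.Dict.keys_insert_of_contains m v hc
      rw [hp]
      simp only [if_true]
      rw [ih (m.insert x v) (fun f hf => by rw [hk]; exact h f (by simp [hf])), hk]
    · simp only [hp]
      exact ih m (fun f hf => h f (by simp [hf]))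

theorem gfold_keys (g : String → String) (xs : List String) :
    (xs.foldl (fun d f => d.insert f (g f)) (PySem.Dict.empty : PySem.Dict String String)).keys
      = PySem.Set.ofList xs := by
  rw [PySem.Dict.keys_foldl_insert]
  rfl

theorem gfold_nodup (g : String → String) (xs : List String) :
    (xs.foldl (fun d f => d.insert f (g f)) (PySem.Dict.empty : PySem.Dict String String)).keys.Nodup := by
  exact PySem.Dict.nodup_keys_foldl_insert _ _ _ PySem.Dict.nodup_keys_empty

-- ===== VERDICT (by name: the statement is the Claim_ definition above) =====
theorem create_feature_tier_mapping_spec : Claim_equal_create_feature_tier_mapping := by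
  unfold Claim_equal_create_feature_tier_mapping Spec_create_feature_tier_mapping
  intro fs _
  unfold create_feature_tier_mapping create_feature_tier_mapping_alt
  rw [stepA_eq]
  simp only [pvOverrides, List.foldl_cons, List.foldl_nil]
  set dA := fs.foldl (fun d f => d.insert f (pvClassify f))
      (PySem.Dict.empty : PySem.Dict String String) with hdA
  set m0 := fs.foldl (fun m f => m.insert f "Tier 1: Ultra-fast")
      (PySem.Dict.empty : PySem.Dict String String) with hm0
  have hmem : ∀ (m : PySem.Dict String String), m.keys = PySem.Set.ofList fs →
      ∀ f ∈ fs, f ∈ m.keys := by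
    intro m hm f hf
    rw [hm]
    exact (PySem.Set.mem_ofList fs f).mpr hf
  have hkA : dA.keys = PySem.Set.ofList fs := gfold_keys _ fs
  have hk0 : m0.keys = PySem.Set.ofList fs := gfold_keys (fun _ => "Tier 1: Ultra-fast") fs
  have hk1 : (pvPass pvKwP "Power System Specific" fs m0).keys = PySem.Set.ofList fs := by
    rw [pvPass_keys _ _ _ _ (hmem m0 hk0), hk0]
  have hk2 : (pvPass pvKw3 "Tier 3: Advanced" fs
      (pvPass pvKwP "Power System Specific" fs m0)).keys = PySem.Set.ofList fs := by
    rw [pvPass_keys _ _ _ _ (hmem _ hk1), hk1]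
  have hkB : (pvPass pvKw2 "Tier 2: Fast" fs (pvPass pvKw3 "Tier 3: Advanced" fs
      (pvPass pvKwP "Power System Specific" fs m0))).keys = PySem.Set.ofList fs := by
    rw [pvPass_keys _ _ _ _ (hmem _ hk2), hk2]
  have hget : ∀ k, dA.get? k
      = (pvPass pvKw2 "Tier 2: Fast" fs (pvPass pvKw3 "Tier 3: Advanced" fs
          (pvPass pvKwP "Power System Specific" fs m0))).get? k := by
    intro k
    rw [hdA, gfold_get?, pvPass_get?, pvPass_get?, pvPass_get?, hm0, gfold_get?]
    unfold pvClassify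
    by_cases hk : k ∈ fs
    · simp only [hk, true_and, if_true]
      simp only [tier2_features, tier3_features, power_system_features, pvKw2, pvKw3, pvKwP]
      split_ifs <;> simp_all
    · simp [hk]
  have hndA : dA.keys.Nodup := gfold_nodup _ fs
  have hndB : (pvPass pvKw2 "Tier 2: Fast" fs (pvPass pvKw3 "Tier 3: Advanced" fs
      (pvPass pvKwP "Power System Specific" fs m0))).keys.Nodup := by
    rw [hkB, ← hkA]; exact hndA
  rw [PySem.Dict.items_eq_map_keys dA hndA "", PySem.Dict.items_eq_map_keys _ hndB "",
    hkA, hkB]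
  apply List.map_congr_left
  intro k _
  simp [PySem.Dict.getD_eq_get?_getD, hget k]
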